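-- pv_equiv track=rewrite | github.com/Headstrung/Forsteri | forsteri/pro_model.py | curtail
-- ===== SOURCE A (Python) =====
-- def curtail(data):
--     """
--     """
--
--     # Make a copy of the data.
--     variables = data.copy()
--
--     # Find all of the start and end dates.
--     starts = []
--     ends = []
--     for variable in variables.values():
--         starts.append(variable[0][0])
--         ends.append(variable[-1][0])
--
--     # Determine the latest start and the earliest end.
--     first = max(starts)
--     last = min(ends)
--
--     # Extract the data.
--     newData = dict()
--     for (key, value) in variables.items():
--         temp = []
--         for point in value:
--             if point[0] < first or point[0] > last:
--                 pass
--             else: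
--                 temp.append(point)
--         newData[key] = temp
--
--     return newData
-- ===== SOURCE B (Python) =====
-- def curtail(data):
--     # A point survives iff it lies in every variable's [first, last] span;
--     # test that intersection membership directly, without computing max/min bounds.
--     def kept(d):
--         return all(v[0][0] <= d <= v[-1][0] for v in data.values())
--     return {k: [p for p in v if kept(p[0])] for k, v in data.items()}
-- ===== Notes on version B (the rewrite author's own statement) =====
-- stated objective: simpler
-- what changed: B never computes the max-start/min-end bounds: it keeps a point iff its date lies inside EVERY variable's [first, last] span, testing membership in the intersection of intervals directly (a universal quantifier over series replaces A's staged bound computation).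
-- outside the precondition, e.g. on curtail({}): A raises ValueError, B returns {}; on curtail({'x': []}): A raises IndexError, B returns {'x': []}
import Mathlib
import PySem

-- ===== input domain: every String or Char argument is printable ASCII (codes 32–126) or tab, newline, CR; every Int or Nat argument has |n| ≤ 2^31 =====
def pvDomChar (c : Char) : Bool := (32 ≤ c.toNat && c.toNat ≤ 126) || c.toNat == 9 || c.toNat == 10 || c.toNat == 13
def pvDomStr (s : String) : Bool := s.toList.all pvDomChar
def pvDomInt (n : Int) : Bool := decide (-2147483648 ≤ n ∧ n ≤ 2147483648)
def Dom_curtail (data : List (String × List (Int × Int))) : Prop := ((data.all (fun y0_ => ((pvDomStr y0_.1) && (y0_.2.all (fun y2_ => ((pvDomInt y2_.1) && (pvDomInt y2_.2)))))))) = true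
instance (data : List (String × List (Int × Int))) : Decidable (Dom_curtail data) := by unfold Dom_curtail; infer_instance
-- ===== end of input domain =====

-- B keeps a point iff its date lies in EVERY variable's [first,last] span (direct
-- intersection-membership test), instead of A's staged max-start/min-end bounds; simpler.

-- ===== PORT A =====
-- variable[0][0] / variable[-1][0]; outside Pre_ (empty series) the default is never claimed
def pvHead1 (v : List (Int × Int)) : Int := ((PySem.List.pyGet? v 0).getD (0, 0)).1
def pvLast1 (v : List (Int × Int)) : Int := ((PySem.List.pyGet? v (-1)).getD (0, 0)).1

def curtail (data : List (String × List (Int × Int))) : List (String × List (Int × Int)) :=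
  let vars_ := data
  -- one loop appending to both starts and ends
  let se := vars_.foldl
    (fun (acc : List Int × List Int) kv =>
      (acc.1 ++ [pvHead1 kv.2], acc.2 ++ [pvLast1 kv.2])) ([], [])
  let first := (PySem.List.max? se.1 (fun y => y)).getD 0
  let last := (PySem.List.min? se.2 (fun y => y)).getD 0
  let newData := vars_.foldl
    (fun acc kv =>
      let temp := kv.2.foldl
        (fun t p => if p.1 < first ∨ last < p.1 then t else t ++ [p]) []
      acc ++ [(kv.1, temp)]) []
  newData

-- ===== PORT B =====
-- 'all(v[0][0] <= d <= v[-1][0] for v in data.values())'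
def pvKept (data : List (String × List (Int × Int))) (d : Int) : Bool :=
  data.all (fun kv => decide (pvHead1 kv.2 ≤ d) && decide (d ≤ pvLast1 kv.2))

def curtail_alt (data : List (String × List (Int × Int))) : List (String × List (Int × Int)) :=
  data.map (fun kv => (kv.1, kv.2.filter (fun p => pvKept data p.1)))

-- ===== PRECONDITION & SPEC =====
-- Pre_ excludes inputs where Python A raises: the empty dict (ValueError from max([]))
-- and any variable with an empty series (IndexError on variable[0]); duplicate keys are
-- excluded because a Python dict cannot carry them.
def Pre_curtail (data : List (String × List (Int × Int))) : Prop :=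
  data ≠ [] ∧ (∀ kv ∈ data, kv.2 ≠ []) ∧ (data.map Prod.fst).Nodup
instance (data : List (String × List (Int × Int))) : Decidable (Pre_curtail data) := by
  unfold Pre_curtail; infer_instance
def pvWitness_curtail : (List (String × List (Int × Int))) :=
  [("a", [(1, 10), (3, 30)]), ("b", [(2, 20), (4, 40)])]

def Spec_curtail (data : List (String × List (Int × Int))) (out : List (String × List (Int × Int))) : Prop := out = curtail_alt data
instance (data : List (String × List (Int × Int))) (out : List (String × List (Int × Int))) : Decidable (Spec_curtail data out) := by unfold Spec_curtail; infer_instance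

-- ===== CLAIM =====
def Claim_equal_curtail : Prop := ∀ (data : List (String × List (Int × Int))), Dom_curtail data → Pre_curtail data → Spec_curtail data (curtail data)

-- ===== LEMMAS AND PROOFS =====

-- A's one loop filling starts and ends is two map passes
lemma se_eq (data : List (String × List (Int × Int))) :
    data.foldl (fun (acc : List Int × List Int) kv =>
        (acc.1 ++ [pvHead1 kv.2], acc.2 ++ [pvLast1 kv.2])) ([], [])
      = (data.map (fun kv => pvHead1 kv.2), data.map (fun kv => pvLast1 kv.2)) := by
  have h : ∀ (l : List (String × List (Int × Int))) (a b : List Int),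
      l.foldl (fun (acc : List Int × List Int) kv =>
          (acc.1 ++ [pvHead1 kv.2], acc.2 ++ [pvLast1 kv.2])) (a, b)
        = (a ++ l.map (fun kv => pvHead1 kv.2), b ++ l.map (fun kv => pvLast1 kv.2)) := by
    intro l
    induction l with
    | nil => simp
    | cons x t ih => intro a b; simp [ih]
  simpa using h data [] []

-- the running max bounds d from above iff every element does
lemma foldl_max_le (t : List Int) (x d : Int) :
    (t.foldl max x ≤ d) ↔ (x ≤ d ∧ ∀ y ∈ t, y ≤ d) := by
  induction t generalizing x with
  | nil => simp
  | cons a s ih =>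
    simp only [List.foldl_cons, ih, max_le_iff, List.mem_cons]
    constructor
    · rintro ⟨⟨h1, h2⟩, h3⟩; exact ⟨h1, fun y hy => by rcases hy with rfl | hy; exact h2; exact h3 y hy⟩
    · rintro ⟨h1, h2⟩; exact ⟨⟨h1, h2 a (.inl rfl)⟩, fun y hy => h2 y (.inr hy)⟩

lemma le_foldl_min (t : List Int) (x d : Int) :
    (d ≤ t.foldl min x) ↔ (d ≤ x ∧ ∀ y ∈ t, d ≤ y) := by
  induction t generalizing x with
  | nil => simp
  | cons a s ih =>
    simp only [List.foldl_cons, ih, le_min_iff, List.mem_cons]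
    constructor
    · rintro ⟨⟨h1, h2⟩, h3⟩; exact ⟨h1, fun y hy => by rcases hy with rfl | hy; exact h2; exact h3 y hy⟩
    · rintro ⟨h1, h2⟩; exact ⟨⟨h1, h2 a (.inl rfl)⟩, fun y hy => h2 y (.inr hy)⟩

-- A's bound test equals B's per-variable membership test, on nonempty data
lemma bounds_eq_kept (v : (String × List (Int × Int))) (it : List (String × List (Int × Int))) (d : Int) :
    (decide ((it.map (fun kv => pvHead1 kv.2)).foldl max (pvHead1 v.2) ≤ d) &&
     decide (d ≤ (it.map (fun kv => pvLast1 kv.2)).foldl min (pvLast1 v.2)))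
      = pvKept (v :: it) d := by
  rw [Bool.eq_iff_iff]
  simp only [Bool.and_eq_true, decide_eq_true_eq, foldl_max_le, le_foldl_min, List.mem_map,
    pvKept, List.all_cons, List.all_eq_true]
  constructor
  · rintro ⟨⟨h1, h2⟩, h3, h4⟩
    exact ⟨⟨h1, h3⟩, fun kv hkv => ⟨h2 _ ⟨kv, hkv, rfl⟩, h4 _ ⟨kv, hkv, rfl⟩⟩⟩
  · rintro ⟨⟨h1, h2⟩, h3⟩
    exact ⟨⟨h1, by rintro y ⟨kv, hkv, rfl⟩; exact (h3 kv hkv).1⟩,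
           ⟨h2, by rintro y ⟨kv, hkv, rfl⟩; exact (h3 kv hkv).2⟩⟩

-- A's inner reject/keep loop is B's filter, once first/last agree
lemma inner_eq (v : List (Int × Int)) (first last : Int) :
    v.foldl (fun t p => if p.1 < first ∨ last < p.1 then t else t ++ [p]) []
      = v.filter (fun p => decide (first ≤ p.1) && decide (p.1 ≤ last)) := by
  have h : ∀ (t : List (Int × Int)) (p : Int × Int),
      (if p.1 < first ∨ last < p.1 then t else t ++ [p])
        = (if (decide (first ≤ p.1) && decide (p.1 ≤ last)) = true then t ++ [p] else t) := by
    intro t p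
    by_cases hc : p.1 < first ∨ last < p.1 <;> simp [hc] <;> omega
  simp only [h]
  simpa using PySem.List.foldl_append_if_eq_filter
    (p := fun p : Int × Int => decide (first ≤ p.1) && decide (p.1 ≤ last)) (l := v) (acc := [])

-- ===== VERDICT =====
theorem curtail_spec : Claim_equal_curtail := by
  intro data _ hpre
  unfold Spec_curtail
  obtain ⟨hne, -, -⟩ := hpre
  match data, hne with
  | v :: it, _ =>
    unfold curtail curtail_alt
    simp only [se_eq, List.map_cons, PySem.List.max?_id_cons, PySem.List.min?_id_cons,
      Option.getD_some]
    rw [PySem.List.foldl_append_singleton_eq_map]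
    simp only [List.nil_append, inner_eq, bounds_eq_kept, List.map_cons]
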